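-- pv_equiv track=rewrite | github.com/MrHamdulay/csc3-capstone | examples/data/Assignment_7/frnpau013/util.py | no_zero_1d
-- ===== SOURCE A (Python) =====
-- def no_zero_1d(grid):
--     """returns True if there are no zeros in a 1d grid; otherwise False"""
--     if grid == []:
--         return True
--     else:
--         if grid[0] == 0:
--             return False
--         else:
--             x = no_zero_1d(grid[1:])
--             return x
-- ===== SOURCE B (Python) =====
-- def no_zero_1d(grid):
--     """returns True if there are no zeros in a 1d grid; otherwise False"""
--     for x in grid:
--         if x == 0:
--             return False
--     return True
-- ===== Notes on version B (the rewrite author's own statement) =====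
-- stated objective: idiomatic
-- what changed: replaces A's slicing recursion (grid[1:] on every step) with a single iterative for-loop with early return
import Mathlib
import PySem

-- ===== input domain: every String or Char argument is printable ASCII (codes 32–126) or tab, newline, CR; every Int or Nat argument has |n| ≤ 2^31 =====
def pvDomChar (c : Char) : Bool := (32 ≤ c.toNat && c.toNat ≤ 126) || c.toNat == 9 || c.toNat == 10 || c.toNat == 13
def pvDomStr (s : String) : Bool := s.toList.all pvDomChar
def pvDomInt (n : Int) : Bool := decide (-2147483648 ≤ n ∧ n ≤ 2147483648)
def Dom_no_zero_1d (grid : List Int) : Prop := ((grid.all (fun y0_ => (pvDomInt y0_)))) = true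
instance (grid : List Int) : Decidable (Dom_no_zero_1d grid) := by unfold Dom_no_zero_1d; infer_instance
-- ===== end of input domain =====

-- B replaces A's slicing recursion with an iterative for-loop scan with early return (idiomatic).

-- ===== PORT A =====
-- A recurses on grid[1:]; in Lean the slice grid[1:] of a cons is the tail.
def no_zero_1d (grid : List Int) : Bool :=
  if grid = [] then true
  else
    if (PySem.List.pyGet? grid 0).getD 0 = 0 then false
    else
      let x := no_zero_1d (PySem.List.slice grid (some 1) none)
      x
termination_by grid.length
decreasing_by
  simp [PySem.List.slice]
  cases grid with
  | nil => simp_all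
  | cons a t => simp

-- ===== PORT B =====
-- for x in grid: if x == 0: return False; return True — structural loop over the list.
def no_zero_1d_alt (grid : List Int) : Bool :=
  match grid with
  | [] => true
  | x :: rest => if x = 0 then false else no_zero_1d_alt rest

-- ===== PRECONDITION & SPEC =====
def Spec_no_zero_1d (grid : List Int) (out : Bool) : Prop := out = no_zero_1d_alt grid
instance (grid : List Int) (out : Bool) : Decidable (Spec_no_zero_1d grid out) := by unfold Spec_no_zero_1d; infer_instance

-- ===== CLAIM (what is proved, stated in full; the proofs are below) =====
def Claim_equal_no_zero_1d : Prop := ∀ (grid : List Int), Dom_no_zero_1d grid → Spec_no_zero_1d grid (no_zero_1d grid)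

-- ===== LEMMAS AND PROOFS =====
theorem no_zero_eq (grid : List Int) : no_zero_1d grid = no_zero_1d_alt grid := by
  induction grid with
  | nil => simp [no_zero_1d, no_zero_1d_alt]
  | cons a t ih =>
    rw [no_zero_1d]
    simp [no_zero_1d_alt, PySem.List.pyGet?, PySem.List.pyIdx?, PySem.List.slice, ih]

-- ===== VERDICT (by name: the statement is the Claim_ definition above) =====
theorem no_zero_1d_spec : Claim_equal_no_zero_1d := by
  intro g _
  exact no_zero_eq g
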